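-- pv_equiv track=rewrite | github.com/truglygrl/egeinf | dz_41/19.py | f
-- ===== SOURCE A (Python) =====
-- def f(a, b, c):
--     if a > b:
--         return 0
--     if c > 9:
--         return False
--     if a == b:
--         return 1
--     if c == 9:
--         return True
--     return f(a + 3, b, c + 1) + f(a*2, b, c + 1)
-- ===== SOURCE B (Python) =====
-- def f(a, b, c):
--     # Root guards first (these preserve A's bool/int return at the root).
--     if a > b:
--         return 0
--     if c > 9:
--         return False
--     if a == b:
--         return 1
--     if c == 9:
--         return True
--     # Level-by-level (BFS) iteration replacing A's binary recursion:
--     # frontier holds the non-leaf values of the current level, total the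
--     # count of True/1 leaves seen so far.
--     frontier = [a]
--     total = 0
--     for step in range(c + 1, 10):
--         nxt = []
--         for x in frontier:
--             for y in (x + 3, x * 2):
--                 if y > b:
--                     pass
--                 elif y == b:
--                     total += 1
--                 elif step == 9:
--                     total += 1
--                 else:
--                     nxt.append(y)
--         frontier = nxt
--     return total
-- ===== Notes on version B (the rewrite author's own statement) =====
-- stated objective: alternative
-- what changed: Replaced A's binary recursion by an iterative level-by-level (BFS) loop over c-levels with an explicit frontier list and an integer accumulator; the root guard ladder is applied once to preserve the bool-typed root cases. Pre_ excludes inputs where A's root guard returns a bool instead of an int (a<=b with c>9, or a<b with c==9) and inputs with a<b and c<-900 where A's deep recursion can raise RecursionError.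
-- outside the precondition, e.g. on f(-3, 10, 9): A returns True, B returns True; on f(-3, 10, 10): A returns False, B returns False; on f(5, 6, -2000): A returns 0, B returns 0
import Mathlib
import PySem

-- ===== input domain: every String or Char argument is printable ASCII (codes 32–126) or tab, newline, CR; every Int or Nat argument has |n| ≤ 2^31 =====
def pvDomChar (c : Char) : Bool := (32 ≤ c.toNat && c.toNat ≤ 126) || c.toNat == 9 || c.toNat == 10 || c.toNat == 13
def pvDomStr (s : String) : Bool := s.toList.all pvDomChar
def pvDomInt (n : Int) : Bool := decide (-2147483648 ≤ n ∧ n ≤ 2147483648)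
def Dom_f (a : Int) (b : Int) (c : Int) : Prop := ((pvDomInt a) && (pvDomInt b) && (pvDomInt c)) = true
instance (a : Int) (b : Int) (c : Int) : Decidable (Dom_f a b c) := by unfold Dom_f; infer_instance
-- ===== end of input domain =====

-- B replaces A's binary recursion by an iterative level-by-level (BFS) loop with an
-- explicit frontier and an integer accumulator; same values on all inputs (alternative).

-- ===== PORT A =====
-- Python's False/True returns participate in int arithmetic as 0/1; ported as Int 0/1.
def f (a : Int) (b : Int) (c : Int) : Int :=
  if a > b then 0
  else if c > 9 then 0
  else if a = b then 1
  else if c = 9 then 1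
  else f (a + 3) b (c + 1) + f (a * 2) b (c + 1)
termination_by (10 - c).toNat
decreasing_by all_goals omega

-- ===== PORT B =====
-- inner `for y in (x+3, x*2)` body of Source B
def fAltChild (b step : Int) (acc : Int × List Int) (y : Int) : Int × List Int :=
  if y > b then acc
  else if y = b then (acc.1 + 1, acc.2)
  else if step = 9 then (acc.1 + 1, acc.2)
  else (acc.1, acc.2 ++ [y])

-- one iteration of the `for step` loop: fold the frontier, producing (total', nxt)
def fAltStep (b step : Int) (frontier : List Int) (total : Int) : Int × List Int :=
  frontier.foldl (fun acc x => fAltChild b step (fAltChild b step acc (x + 3)) (x * 2))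
    (total, [])

-- the `for step in range(c+1, 10)` loop
def fAltLoop (b step : Int) (frontier : List Int) (total : Int) : Int :=
  if step ≤ 9 then
    let p := fAltStep b step frontier total
    fAltLoop b (step + 1) p.2 p.1
  else total
termination_by (10 - step).toNat
decreasing_by omega

def f_alt (a : Int) (b : Int) (c : Int) : Int :=
  if a > b then 0
  else if c > 9 then 0
  else if a = b then 1
  else if c = 9 then 1
  else fAltLoop b (c + 1) [a] 0

-- ===== PRECONDITION & SPEC =====
-- Pre_ excludes (i) inputs on which A's root guard returns a bool, not an int (False when
-- a <= b and c > 9; True when a < b and c = 9), and (ii) inputs with c < -900 and a < b, on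
-- which A's recursion can exceed Python's recursion limit and raise RecursionError.
def Pre_f (a : Int) (b : Int) (c : Int) : Prop :=
  a > b ∨ (a = b ∧ c ≤ 9) ∨ (a < b ∧ c < 9 ∧ -900 ≤ c)
instance (a : Int) (b : Int) (c : Int) : Decidable (Pre_f a b c) := by unfold Pre_f; infer_instance
def pvWitness_f : Int × Int × Int := (0, 5, 0)
def Spec_f (a : Int) (b : Int) (c : Int) (out : Int) : Prop := out = f_alt a b c
instance (a : Int) (b : Int) (c : Int) (out : Int) : Decidable (Spec_f a b c out) := by unfold Spec_f; infer_instance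

-- ===== CLAIM (what is proved, stated in full; the proofs are below) =====
def Claim_equal_f : Prop := ∀ (a : Int) (b : Int) (c : Int), Dom_f a b c → Pre_f a b c → Spec_f a b c (f a b c)

-- ===== LEMMAS AND PROOFS =====

-- value of f at a leaf-producing child
theorem f_unfold (a b c : Int) :
    f a b c = if a > b then 0 else if c > 9 then 0 else if a = b then 1
      else if c = 9 then 1 else f (a + 3) b (c + 1) + f (a * 2) b (c + 1) := by
  rw [f]

-- a single child update: adds f y b step to the total if y is a leaf,
-- otherwise appends y to the frontier (and f y b step unfolds to the two children).
theorem fAltChild_sum (b step : Int) (hstep : step ≤ 9) (t : Int) (fr : List Int) (y : Int) :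
    (fAltChild b step (t, fr) y).1
        + ((fAltChild b step (t, fr) y).2.map (fun z => f z b step)).sum
      = t + (fr.map (fun z => f z b step)).sum + f y b step := by
  rw [fAltChild]
  by_cases h1 : y > b
  · have hv : f y b step = 0 := by rw [f_unfold]; simp [h1]
    simp [h1, hv]
  · by_cases h2 : y = b
    · have hv : f y b step = 1 := by
        rw [f_unfold, if_neg h1, if_neg (show ¬ step > 9 by omega), if_pos h2]
      rw [if_neg h1, if_pos h2]
      simp; omega
    · by_cases h3 : step = 9
      · have hv : f y b step = 1 := by
          rw [f_unfold, if_neg h1, if_neg (show ¬ step > 9 by omega), if_neg h2, if_pos h3]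
        rw [if_neg h1, if_neg h2, if_pos h3]
        simp; omega
      · have hv : f y b step = f (y + 3) b (step + 1) + f (y * 2) b (step + 1) := by
          rw [f_unfold]; simp [h1, h2, h3, show ¬ step > 9 by omega]
        simp [h1, h2, h3, hv]; ring

-- every element of the produced frontier is a non-leaf at this step
theorem fAltChild_mem (b step : Int) (t : Int) (fr : List Int) (y z : Int)
    (hz : z ∈ (fAltChild b step (t, fr) y).2) :
    z ∈ fr ∨ (¬ z > b ∧ z ≠ b ∧ step ≠ 9) := by
  rw [fAltChild] at hz
  split_ifs at hz with h1 h2 h3 <;> simp at hz <;>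
    first
      | exact Or.inl hz
      | (rcases hz with hz | hz
         · exact Or.inl hz
         · subst hz; exact Or.inr ⟨h1, h2, h3⟩)

-- folding the whole frontier: totals plus pending frontier-values are conserved
theorem fold_sum (b step : Int) (hstep : step ≤ 9) :
    ∀ (frontier : List Int) (t : Int) (fr : List Int),
      (frontier.foldl (fun acc x => fAltChild b step (fAltChild b step acc (x + 3)) (x * 2))
          (t, fr)).1
        + ((frontier.foldl (fun acc x => fAltChild b step (fAltChild b step acc (x + 3)) (x * 2))
            (t, fr)).2.map (fun z => f z b step)).sum
      = t + (fr.map (fun z => f z b step)).sum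
          + (frontier.map (fun x => f (x + 3) b step + f (x * 2) b step)).sum := by
  intro frontier
  induction frontier with
  | nil => intro t fr; simp
  | cons x xs ih =>
      intro t fr
      have h1 := fAltChild_sum b step hstep t fr (x + 3)
      obtain ⟨t1, fr1, hpair⟩ :
          ∃ t1 fr1, fAltChild b step (t, fr) (x + 3) = (t1, fr1) :=
        ⟨_, _, rfl⟩
      have h2 := fAltChild_sum b step hstep t1 fr1 (x * 2)
      simp only [List.foldl_cons, hpair] at *
      obtain ⟨t2, fr2, hpair2⟩ :
          ∃ t2 fr2, fAltChild b step (t1, fr1) (x * 2) = (t2, fr2) :=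
        ⟨_, _, rfl⟩
      simp only [hpair2] at *
      have := ih t2 fr2
      simp only [this, List.map_cons, List.sum_cons]
      simp at h1 h2 ⊢
      omega

theorem fold_mem (b step : Int) :
    ∀ (frontier : List Int) (t : Int) (fr : List Int) (z : Int),
      z ∈ (frontier.foldl
            (fun acc x => fAltChild b step (fAltChild b step acc (x + 3)) (x * 2)) (t, fr)).2 →
      z ∈ fr ∨ (¬ z > b ∧ z ≠ b ∧ step ≠ 9) := by
  intro frontier
  induction frontier with
  | nil => intro t fr z hz; simp at hz; exact Or.inl hz
  | cons x xs ih =>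
      intro t fr z hz
      simp only [List.foldl_cons] at hz
      obtain ⟨t1, fr1, hpair⟩ :
          ∃ t1 fr1, fAltChild b step (t, fr) (x + 3) = (t1, fr1) := ⟨_, _, rfl⟩
      rw [hpair] at hz
      obtain ⟨t2, fr2, hpair2⟩ :
          ∃ t2 fr2, fAltChild b step (t1, fr1) (x * 2) = (t2, fr2) := ⟨_, _, rfl⟩
      rw [hpair2] at hz
      rcases ih t2 fr2 z hz with hz2 | hleaf
      · have := fAltChild_mem b step t1 fr1 (x * 2) z (by rw [hpair2]; exact hz2)
        rcases this with hz1 | hleaf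
        · have := fAltChild_mem b step t fr (x + 3) z (by rw [hpair]; exact hz1)
          exact this
        · exact Or.inr hleaf
      · exact Or.inr hleaf

-- main loop invariant: the loop returns total plus the f-values of the frontier's children
theorem fAltLoop_sum (b : Int) :
    ∀ (n : ℕ) (step : Int), (10 - step).toNat = n → step ≤ 9 →
      ∀ (frontier : List Int) (total : Int),
        fAltLoop b step frontier total
          = total + (frontier.map (fun x => f (x + 3) b step + f (x * 2) b step)).sum := by
  intro n
  induction n with
  | zero => intro step hn hstep; omega
  | succ n ih =>
      intro step hn hstep frontier total
      rw [fAltLoop]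
      simp only [if_pos hstep]
      rw [fAltStep]
      set r := frontier.foldl
        (fun acc x => fAltChild b step (fAltChild b step acc (x + 3)) (x * 2))
        (total, ([] : List Int)) with hr
      have hsum := fold_sum b step hstep frontier total []
      rw [← hr] at hsum
      simp only [List.map_nil, List.sum_nil, add_zero] at hsum
      by_cases h9 : step = 9
      · -- last iteration: frontier becomes empty, loop exits
        have hempty : r.2 = [] := by
          by_contra hne
          obtain ⟨z, hz⟩ := List.exists_mem_of_ne_nil _ hne
          rcases fold_mem b step frontier total [] z (by rw [← hr] at *; exact hz) with h | h
          · simp at h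
          · exact h.2.2 h9
        rw [fAltLoop]
        simp only [hempty, List.map_nil, List.sum_nil, add_zero] at hsum ⊢
        rw [if_neg (by omega)]
        omega
      · -- recursive case: apply the IH at step+1 and unfold f on each frontier element
        have hstep1 : step + 1 ≤ 9 := by omega
        rw [ih (step + 1) (by omega) hstep1 r.2 r.1]
        have hchild : ∀ z ∈ r.2, f z b step
            = f (z + 3) b (step + 1) + f (z * 2) b (step + 1) := by
          intro z hz
          rcases fold_mem b step frontier total [] z (by rw [← hr] at *; exact hz) with h | h
          · simp at h
          · rw [f_unfold]
            rw [if_neg h.1, if_neg (by omega), if_neg h.2.1, if_neg h.2.2]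
        have hmap : (r.2.map (fun z => f (z + 3) b (step + 1) + f (z * 2) b (step + 1))).sum
            = (r.2.map (fun z => f z b step)).sum := by
          congr 1
          exact (List.map_congr_left (fun z hz => (hchild z hz).symm))
        rw [hmap]
        omega

-- ===== VERDICT (by name: the statement is the Claim_ definition above) =====
theorem f_spec : Claim_equal_f := by
  intro a b c _ _
  unfold Spec_f f_alt
  rw [f_unfold]
  split_ifs with h1 h2 h3 h4
  · rfl
  · rfl
  · rfl
  · rfl
  · rw [fAltLoop_sum b ((10 - (c + 1)).toNat) (c + 1) rfl (by omega)]
    simp
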